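-- pv_equiv track=rewrite | github.com/UndiFineD/PyAgent | src/core/base/lifecycle/agent_core.py | update_fixed_items
-- ===== SOURCE A (Python) =====
-- def update_fixed_items(content: str, fixed_items: list[str]) -> str:
--     """Calculates the new content for an improvements file with fixed items marked."""
--     if not content or not fixed_items:
--         return content
--
--     lines = content.splitlines()
--     new_lines: list[str] = []
--
--     for line in lines:
--         updated = False
--         for item in fixed_items:
--             if item in line:
--                 if "- [ ]" in line:
--                     new_lines.append(line.replace("- [ ]", "- [x]"))
--                     updated = True
--                     break
--                 elif "[x]" not in line and "[Fixed]" not in line: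
--                     new_lines.append(line + " [Fixed]")
--                     updated = True
--                     break
--         if not updated:
--             new_lines.append(line)
--
--     return "\n".join(new_lines) + "\n"
-- ===== SOURCE B (Python) =====
-- def update_fixed_items(content: str, fixed_items: list[str]) -> str:
--     """Mark lines containing fixed items as done/fixed.
--
--     Different algorithm: instead of testing every item against every line,
--     each item is searched once in the WHOLE text with global str.find scans;
--     every occurrence offset is mapped to its line through a precomputed
--     offset->line table and the line is marked if the occurrence lies fully
--     inside it; a final pass rewrites exactly the marked lines."""
--     if not content or not fixed_items:
--         return content
--
--     n = len(content)
--     lines = content.splitlines()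
--
--     # (start, end) offsets of each line inside content
--     spans = []
--     i = 0
--     for line in lines:
--         j = i + len(line)
--         spans.append((i, j))
--         if j < n and content[j] == "\r" and j + 1 < n and content[j + 1] == "\n":
--             i = j + 2
--         else:
--             i = j + 1
--
--     # owner[p] = index of the line whose region [start_k, next_start_k) holds offset p
--     starts = [s for s, _ in spans] + [n + 1]
--     owner = []
--     for k in range(len(spans)):
--         owner.extend([k] * (starts[k + 1] - starts[k]))
--
--     # one global scan per item: mark every line that fully contains an occurrence
--     # (stop as soon as every line is already marked)
--     matched = [False] * len(lines)
--     for item in fixed_items: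
--         if all(matched):
--             break
--         p = content.find(item)
--         while p != -1:
--             k = owner[p]
--             if p + len(item) <= spans[k][1]:
--                 matched[k] = True
--             p = content.find(item, p + 1)
--
--     # rewrite pass over the marked lines only
--     out = []
--     for k, line in enumerate(lines):
--         if matched[k]:
--             if "- [ ]" in line:
--                 out.append(line.replace("- [ ]", "- [x]"))
--             elif "[x]" not in line and "[Fixed]" not in line:
--                 out.append(line + " [Fixed]")
--             else:
--                 out.append(line)
--         else:
--             out.append(line)
--     return "\n".join(out) + "\n"
-- ===== Notes on version B (the rewrite author's own statement) =====
-- stated objective: alternative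
-- what changed: Instead of A's nested per-line x per-item membership loop, B searches each item once in the WHOLE text with repeated str.find scans (stopping early once every line is marked), maps every occurrence offset to its line through precomputed line spans and an offset->line owner table, and rewrites exactly the marked lines in a final pass.
import Mathlib
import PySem

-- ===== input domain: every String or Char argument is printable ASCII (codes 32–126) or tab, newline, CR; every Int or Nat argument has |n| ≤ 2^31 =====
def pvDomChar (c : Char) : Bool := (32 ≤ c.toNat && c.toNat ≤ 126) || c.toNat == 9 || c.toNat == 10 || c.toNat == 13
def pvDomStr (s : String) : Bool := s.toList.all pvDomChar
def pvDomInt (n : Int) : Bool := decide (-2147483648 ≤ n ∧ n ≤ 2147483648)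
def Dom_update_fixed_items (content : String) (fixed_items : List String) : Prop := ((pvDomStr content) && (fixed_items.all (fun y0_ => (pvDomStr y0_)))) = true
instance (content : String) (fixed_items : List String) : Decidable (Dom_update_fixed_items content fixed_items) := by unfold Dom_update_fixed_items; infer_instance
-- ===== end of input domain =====

-- B replaces A's per-line × per-item membership loop by one global find-scan of the
-- whole text per item, mapping occurrence offsets to lines through an offset->line
-- table (objective: alternative; measured speed comparable).


-- ===== PORT A =====
-- inner 'for item in fixed_items' loop: returns the line appended for this source
-- line (some) or none if the loop falls through with updated == False
def pvInnerA (line : String) : List String → Option String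
  | [] => none
  | item :: rest =>
    if PySem.Str.isIn item line then
      if PySem.Str.isIn "- [ ]" line then
        some (PySem.Str.replace line "- [ ]" "- [x]")
      else if !PySem.Str.isIn "[x]" line && !PySem.Str.isIn "[Fixed]" line then
        some (line ++ " [Fixed]")
      else pvInnerA line rest
    else pvInnerA line rest

def update_fixed_items (content : String) (fixed_items : List String) : String :=
  if content = "" ∨ fixed_items = [] then content
  else
    PySem.Str.join "\n"
      ((PySem.Str.splitlines content).foldl (fun acc line =>
        match pvInnerA line fixed_items with
        | some s => acc ++ [s]       -- appended inside the loop before 'break'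
        | none => acc ++ [line]) []) -- 'if not updated: new_lines.append(line)'
      ++ "\n"

-- ===== PORT B =====
-- 'for line in lines' offset loop building spans: (start, end) of each line in content
def pvSpansGo (s : List Char) (n : Nat) : List (List Char) → Nat → List (Nat × Nat)
  | [], _ => []
  | line :: rest, i =>
    let j := i + line.length
    (i, j) ::
      pvSpansGo s n rest
        (if j < n ∧ s.getD j ' ' = '\r' ∧ j + 1 < n ∧ s.getD (j + 1) ' ' = '\n' then j + 2
         else j + 1)

-- 'for k in range(len(spans)): owner.extend([k] * (starts[k+1] - starts[k]))'
def pvOwnerGo : List Nat → Nat → List Nat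
  | s0 :: s1 :: rest, k => List.replicate (s1 - s0) k ++ pvOwnerGo (s1 :: rest) (k + 1)
  | _, _ => []

-- findFrom with a start past the end is -1 (CPython rule; used for termination)
lemma pvFindFrom_of_gt (s sub : List Char) (k : Nat) (h : s.length < k) :
    PySem.Chars.findFrom s sub (k : Int) none = -1 := by
  simp only [PySem.Chars.findFrom]
  have : (s.length : Int) < (k : Int) := by exact_mod_cast h
  simp only [if_neg (by omega : ¬ (k : Int) < 0)]
  rw [if_pos (by omega)]

-- 'p = content.find(item); while p != -1: … p = content.find(item, p + 1)'
def pvMarkItemGo (s item : List Char) (owner : List Nat) (spans : List (Nat × Nat))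
    (matched : List Bool) (start : Nat) : List Bool :=
  let p := PySem.Chars.findFrom s item (start : Int) none
  if hp : p = -1 then matched
  else
    let k := owner.getD p.toNat 0
    pvMarkItemGo s item owner spans
      (if p.toNat + item.length ≤ (spans.getD k (0, 0)).2 then matched.set k true else matched)
      (p.toNat + 1)
termination_by s.length + 1 - start
decreasing_by
  by_cases hle : start ≤ s.length
  · have hspec := PySem.Chars.findFrom_natCast_spec s item start hle hp
    omega
  · exact absurd (pvFindFrom_of_gt s item start (by omega)) hp

-- 'for item in fixed_items: if all(matched): break; …' outer loop
def pvMarkItemsGo (s : List Char) (owner : List Nat) (spans : List (Nat × Nat)) :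
    List String → List Bool → List Bool
  | [], matched => matched
  | item :: rest, matched =>
    if matched.all (fun b => b) then matched
    else pvMarkItemsGo s owner spans rest (pvMarkItemGo s item.toList owner spans matched 0)

-- the per-line rewrite applied to a marked line
def pvRewriteC (line : List Char) : List Char :=
  if PySem.Chars.isIn ['-', ' ', '[', ' ', ']'] line then
    PySem.Chars.replace line ['-', ' ', '[', ' ', ']'] ['-', ' ', '[', 'x', ']']
  else if !PySem.Chars.isIn ['[', 'x', ']'] line &&
          !PySem.Chars.isIn ['[', 'F', 'i', 'x', 'e', 'd', ']'] line then
    line ++ [' ', '[', 'F', 'i', 'x', 'e', 'd', ']']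
  else line

-- 'for k, line in enumerate(lines): …' rewrite pass
def pvOutGo (matched : List Bool) : List (List Char) → Nat → List (List Char)
  | [], _ => []
  | line :: rest, k =>
    (if matched.getD k false then pvRewriteC line else line) :: pvOutGo matched rest (k + 1)

def update_fixed_items_alt (content : String) (fixed_items : List String) : String :=
  if content = "" ∨ fixed_items = [] then content
  else
    let s := content.toList
    let n := s.length
    let lines := PySem.Chars.splitlines s
    let spans := pvSpansGo s n lines 0
    let owner := pvOwnerGo (spans.map (·.1) ++ [n + 1]) 0
    let matched := pvMarkItemsGo s owner spans fixed_items
      (List.replicate lines.length false)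
    String.ofList (PySem.Chars.join ['\n'] (pvOutGo matched lines 0) ++ ['\n'])

-- ===== PRECONDITION & SPEC =====
def Spec_update_fixed_items (content : String) (fixed_items : List String) (out : String) : Prop := out = update_fixed_items_alt content fixed_items
instance (content : String) (fixed_items : List String) (out : String) : Decidable (Spec_update_fixed_items content fixed_items out) := by unfold Spec_update_fixed_items; infer_instance

-- ===== CLAIM (what is proved, stated in full; the proofs are below) =====
def Claim_equal_update_fixed_items : Prop := ∀ (content : String) (fixed_items : List String), Dom_update_fixed_items content fixed_items → Spec_update_fixed_items content fixed_items (update_fixed_items content fixed_items)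

-- ===== LEMMAS AND PROOFS =====

-- a successful findFrom result is at most len(s) (used for termination)
lemma pvFindFrom_le_len (s sub : List Char) (k : Nat) :
    PySem.Chars.findFrom s sub (k : Int) none ≤ (s.length : Int) := by
  simp only [PySem.Chars.findFrom]
  have h1 := PySem.Chars.neg_one_le_find (List.drop ((k : Int)).toNat (List.take ((s.length : Int)).toNat s)) sub
  have h2 := PySem.Chars.find_le_length (List.drop ((k : Int)).toNat (List.take ((s.length : Int)).toNat s)) sub
  split
  · omega
  · split
    · omega
    · simp only [List.length_drop, List.length_take] at h2
      have : ((k : Int)).toNat = k := Int.toNat_natCast k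
      omega

-- ---------- splitlines machinery ----------

-- the concrete break predicate splitlines uses
def pvIsB (c : Char) : Bool :=
  decide (c.toNat = 10) || decide (c.toNat = 13) || decide (c.toNat = 11) ||
  decide (c.toNat = 12) || decide (c.toNat = 28) || decide (c.toNat = 29) ||
  decide (c.toNat = 30) || decide (c.toNat = 133) || decide (c.toNat = 8232) ||
  decide (c.toNat = 8233)

lemma pv_splitlines_eq_go (s : List Char) :
    PySem.Chars.splitlines s = PySem.Chars.splitlines.go pvIsB s [] [] := rfl

lemma pv_go_nil (isB : Char → Bool) (cur : List Char) (acc : List (List Char)) :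
    PySem.Chars.splitlines.go isB [] cur acc =
      if cur.isEmpty then acc.reverse else (cur.reverse :: acc).reverse := by
  rw [PySem.Chars.splitlines.go]

lemma pv_go_crlf (isB : Char → Bool) (cur : List Char) (acc : List (List Char)) (rest : List Char) :
    PySem.Chars.splitlines.go isB ('\r' :: '\n' :: rest) cur acc =
      PySem.Chars.splitlines.go isB rest [] (cur.reverse :: acc) := by
  rw [PySem.Chars.splitlines.go]

lemma pv_go_cons_ne (isB : Char → Bool) (cur : List Char) (acc : List (List Char))
    (c : Char) (rest : List Char) (hc : c ≠ '\r') :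
    PySem.Chars.splitlines.go isB (c :: rest) cur acc =
      if isB c then PySem.Chars.splitlines.go isB rest [] (cur.reverse :: acc)
      else PySem.Chars.splitlines.go isB rest (c :: cur) acc := by
  rw [PySem.Chars.splitlines.go.eq_def]
  split
  · next heq => cases heq
  · next heq =>
      injection heq with h1 h2
      exact absurd h1 hc
  · next heq =>
      injection heq with h1 h2
      subst h1; subst h2; rfl

lemma pv_go_cr (isB : Char → Bool) (cur : List Char) (acc : List (List Char))
    (rest : List Char) (h : ∀ r', rest ≠ '\n' :: r') (hb : isB '\r' = true) :
    PySem.Chars.splitlines.go isB ('\r' :: rest) cur acc =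
      PySem.Chars.splitlines.go isB rest [] (cur.reverse :: acc) := by
  rw [PySem.Chars.splitlines.go.eq_def]
  split
  · next heq => cases heq
  · next heq =>
      injection heq with h1 h2
      exact absurd h2 (h _)
  · next heq =>
      injection heq with h1 h2
      subst h1; subst h2; simp [hb]

lemma pv_go_acc (isB : Char → Bool) (hbr : isB '\r' = true) :
    ∀ (m : Nat) (s : List Char), s.length ≤ m → ∀ (cur : List Char) (acc : List (List Char)),
      PySem.Chars.splitlines.go isB s cur acc =
        acc.reverse ++ PySem.Chars.splitlines.go isB s cur [] := by
  intro m
  induction m with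
  | zero =>
    intro s hs cur acc
    have : s = [] := List.length_eq_zero_iff.mp (Nat.le_zero.mp hs)
    subst this
    rw [pv_go_nil, pv_go_nil]
    split <;> simp
  | succ m ih =>
    intro s hs cur acc
    cases s with
    | nil =>
      rw [pv_go_nil, pv_go_nil]
      split <;> simp
    | cons c rest =>
      simp only [List.length_cons] at hs
      by_cases hc : c = '\r'
      · subst hc
        cases rest with
        | nil =>
          rw [pv_go_cr isB _ _ [] (by intro r' h; cases h) hbr,
              pv_go_cr isB _ _ [] (by intro r' h; cases h) hbr]
          rw [pv_go_nil, pv_go_nil]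
          simp
        | cons c2 r2 =>
          simp only [List.length_cons] at hs
          by_cases hc2 : c2 = '\n'
          · subst hc2
            rw [pv_go_crlf, pv_go_crlf]
            rw [ih r2 (by omega) [] (cur.reverse :: acc), ih r2 (by omega) [] [cur.reverse]]
            simp
          · have hne : ∀ r', c2 :: r2 ≠ '\n' :: r' := by
              intro r' h; injection h with h1 _; exact hc2 h1
            rw [pv_go_cr isB _ _ (c2 :: r2) hne hbr,
                pv_go_cr isB _ _ (c2 :: r2) hne hbr]
            rw [ih (c2 :: r2) (by simp; omega) [] (cur.reverse :: acc),
                ih (c2 :: r2) (by simp; omega) [] [cur.reverse]]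
            simp
      · rw [pv_go_cons_ne isB _ _ c rest hc, pv_go_cons_ne isB _ _ c rest hc]
        by_cases hb : isB c
        · simp only [hb, if_true]
          rw [ih rest (by omega) [] (cur.reverse :: acc), ih rest (by omega) [] [cur.reverse]]
          simp
        · have hb' : isB c = false := by simpa using hb
          simp only [hb', Bool.false_eq_true, if_false]
          rw [ih rest (by omega) (c :: cur) acc]

-- a run of non-break characters is accumulated into cur
lemma pv_go_line (isB : Char → Bool) (hbr : isB '\r' = true) :
    ∀ (line : List Char), line.all (fun c => isB c = false) →
      ∀ (s : List Char) (cur : List Char) (acc : List (List Char)),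
        PySem.Chars.splitlines.go isB (line ++ s) cur acc =
          PySem.Chars.splitlines.go isB s (line.reverse ++ cur) acc := by
  intro line
  induction line with
  | nil => intro _ s cur acc; simp
  | cons c cs ih =>
    intro hall s cur acc
    simp only [List.all_cons, Bool.and_eq_true, decide_eq_true_eq] at hall
    obtain ⟨hc, hcs⟩ := hall
    have hcr : c ≠ '\r' := by intro h; subst h; rw [hbr] at hc; cases hc
    rw [List.cons_append, pv_go_cons_ne isB _ _ c _ hcr]
    simp only [hc]
    rw [ih (by simpa using hcs) s (c :: cur) acc]
    simp


-- ---------- characters ----------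

-- non-break characters, as B's span scan sees them
def pvNB (c : Char) : Bool := !(c == '\n' || c == '\r')

lemma pv_toNat_eq (c : Char) (n : Nat) (h : c.toNat = n) : c = Char.ofNat n := by
  have := Char.ofNat_toNat c
  rw [h] at this
  exact this.symm

lemma pv_nb_isB (c : Char) (hd : pvDomChar c = true) (hnb : pvNB c = true) :
    pvIsB c = false := by
  simp only [pvNB, Bool.not_eq_true', Bool.or_eq_false_iff, beq_eq_false_iff_ne] at hnb
  have h10 : c.toNat ≠ 10 := fun h => hnb.1 (pv_toNat_eq c 10 h)
  have h13 : c.toNat ≠ 13 := fun h => hnb.2 (pv_toNat_eq c 13 h)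
  simp only [pvDomChar, Bool.or_eq_true, Bool.and_eq_true, decide_eq_true_eq, beq_iff_eq] at hd
  simp only [pvIsB, Bool.or_eq_false_iff, decide_eq_false_iff_not]
  omega

-- ---------- splitlines decomposition ----------

lemma pv_splitlines_nil : PySem.Chars.splitlines ([] : List Char) = [] := rfl

lemma pv_splitlines_last (line : List Char) (hall : line.all (fun c => pvIsB c = false) = true)
    (hne : line ≠ []) : PySem.Chars.splitlines line = [line] := by
  rw [pv_splitlines_eq_go]
  have := pv_go_line pvIsB (by decide) line hall [] [] []
  rw [List.append_nil] at this
  rw [this, pv_go_nil]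
  have : line.reverse.isEmpty = false := by
    simp [hne]
  simp [this]

lemma pv_splitlines_cons (line sep rest : List Char)
    (hall : line.all (fun c => pvIsB c = false) = true)
    (hsep : sep = ['\r', '\n'] ∨ sep = ['\n'] ∨ (sep = ['\r'] ∧ ∀ r', rest ≠ '\n' :: r')) :
    PySem.Chars.splitlines (line ++ sep ++ rest) = line :: PySem.Chars.splitlines rest := by
  rw [pv_splitlines_eq_go, List.append_assoc, pv_go_line pvIsB (by decide) line hall]
  have hfin : PySem.Chars.splitlines.go pvIsB rest [] [line.reverse.reverse] =
      line :: PySem.Chars.splitlines rest := by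
    rw [pv_go_acc pvIsB (by decide) rest.length rest le_rfl]
    simp [pv_splitlines_eq_go]
  rcases hsep with h | h | ⟨h, hr⟩
  · subst h
    simp only [List.cons_append, List.nil_append]
    rw [pv_go_crlf]
    simpa using hfin
  · subst h
    simp only [List.cons_append, List.nil_append]
    rw [pv_go_cons_ne pvIsB _ _ '\n' rest (by decide)]
    simp only [show pvIsB '\n' = true by decide, if_true]
    simpa using hfin
  · subst h
    simp only [List.cons_append, List.nil_append]
    rw [pv_go_cr pvIsB _ _ rest hr (by decide)]
    simpa using hfin

-- ---------- span facts ----------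

def pvSpanOK (s : List Char) (lines : List (List Char)) (spans : List (Nat × Nat)) : Prop :=
  spans.length = lines.length ∧
  ∀ k, k < spans.length →
    (spans.getD k (0, 0)).2 = (spans.getD k (0, 0)).1 + (lines.getD k []).length ∧
    (s.drop (spans.getD k (0, 0)).1).take (lines.getD k []).length = lines.getD k [] ∧
    (spans.getD k (0, 0)).2 ≤ s.length ∧
    (k + 1 < spans.length → (spans.getD k (0, 0)).2 < (spans.getD (k + 1) (0, 0)).1)


lemma pv_spanOK_cons (s : List Char) (i : Nat) (line : List Char) (L : List (List Char))
    (spans : List (Nat × Nat)) (i' : Nat)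
    (hok : pvSpanOK s L spans) (hhead : 0 < spans.length → (spans.getD 0 (0, 0)).1 = i')
    (hslice : (s.drop i).take line.length = line) (hle : i + line.length ≤ s.length)
    (hlt : i + line.length < i') :
    pvSpanOK s (line :: L) ((i, i + line.length) :: spans) := by
  obtain ⟨hlen, hk⟩ := hok
  refine ⟨by simp [hlen], ?_⟩
  intro k hkk
  cases k with
  | zero =>
    refine ⟨rfl, by simpa using hslice, by simpa using hle, ?_⟩
    intro h1
    have h1' : 0 < spans.length := by simpa using h1
    simp only [List.getD_cons_succ, List.getD_cons_zero]
    rw [hhead h1']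
    exact hlt
  | succ k =>
    simp only [List.length_cons, Nat.add_lt_add_iff_right] at hkk
    obtain ⟨h1, h2, h3, h4⟩ := hk k hkk
    exact ⟨by simpa using h1, by simpa using h2, by simpa using h3,
      fun hh => by simpa using h4 (by simpa using hh)⟩


lemma pv_span_step_common (m : Nat)
    (ih : ∀ (s : List Char) (i : Nat), s.length - i ≤ m → i ≤ s.length →
      (s.drop i).all pvDomChar = true →
      pvSpanOK s (PySem.Chars.splitlines (s.drop i))
        (pvSpansGo s s.length (PySem.Chars.splitlines (s.drop i)) i) ∧
      (0 < (pvSpansGo s s.length (PySem.Chars.splitlines (s.drop i)) i).length →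
        ((pvSpansGo s s.length (PySem.Chars.splitlines (s.drop i)) i).getD 0 (0, 0)).1 = i))
    (s line rest : List Char) (i i' : Nat)
    (hsl : PySem.Chars.splitlines (s.drop i) = line :: PySem.Chars.splitlines rest)
    (hdropi' : s.drop i' = rest)
    (hif : (if i + line.length < s.length ∧ s.getD (i + line.length) ' ' = '\r' ∧
        i + line.length + 1 < s.length ∧ s.getD (i + line.length + 1) ' ' = '\n'
        then i + line.length + 2 else i + line.length + 1) = i')
    (hslice : (s.drop i).take line.length = line)
    (hlt : i + line.length < i') (hi'n : i' ≤ s.length)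
    (hm : s.length - i ≤ m + 1)
    (hdom' : (s.drop i').all pvDomChar = true) :
    pvSpanOK s (PySem.Chars.splitlines (s.drop i))
      (pvSpansGo s s.length (PySem.Chars.splitlines (s.drop i)) i) ∧
    (0 < (pvSpansGo s s.length (PySem.Chars.splitlines (s.drop i)) i).length →
      ((pvSpansGo s s.length (PySem.Chars.splitlines (s.drop i)) i).getD 0 (0, 0)).1 = i) := by
  obtain ⟨ok', head'⟩ := ih s i' (by omega) hi'n hdom'
  rw [hdropi'] at ok' head'
  have hstep : pvSpansGo s s.length (line :: PySem.Chars.splitlines rest) i =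
      (i, i + line.length) :: pvSpansGo s s.length (PySem.Chars.splitlines rest) i' := by
    simp only [pvSpansGo]
    rw [hif]
  rw [hsl, hstep]
  exact ⟨pv_spanOK_cons s i line _ _ i' ok' head' hslice (by omega) hlt, fun _ => rfl⟩

lemma pv_spansGo_ok : ∀ (m : Nat) (s : List Char) (i : Nat),
    s.length - i ≤ m → i ≤ s.length → (s.drop i).all pvDomChar = true →
    pvSpanOK s (PySem.Chars.splitlines (s.drop i))
      (pvSpansGo s s.length (PySem.Chars.splitlines (s.drop i)) i) ∧
    (0 < (pvSpansGo s s.length (PySem.Chars.splitlines (s.drop i)) i).length →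
      ((pvSpansGo s s.length (PySem.Chars.splitlines (s.drop i)) i).getD 0 (0, 0)).1 = i) := by
  intro m
  induction m with
  | zero =>
    intro s i hm hi hdom
    have hdrop : s.drop i = [] := by
      have : s.length - i = 0 := Nat.le_zero.mp hm
      exact List.drop_eq_nil_iff.mpr (by omega)
    rw [hdrop, pv_splitlines_nil]
    exact ⟨⟨rfl, fun k hk => absurd hk (by simp [pvSpansGo])⟩, fun h => absurd h (by simp [pvSpansGo])⟩
  | succ m ih =>
    intro s i hm hi hdom
    by_cases hempty : s.drop i = []
    · rw [hempty, pv_splitlines_nil]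
      exact ⟨⟨rfl, fun k hk => absurd hk (by simp [pvSpansGo])⟩, fun h => absurd h (by simp [pvSpansGo])⟩
    · -- decompose s.drop i = line ++ (sep ++ rest)
      set t := s.drop i with ht
      set line := t.takeWhile pvNB with hline
      set r := t.dropWhile pvNB with hr
      have hsplit : line ++ r = t := List.takeWhile_append_dropWhile
      have hlens : t.length = s.length - i := by rw [ht]; simp
      have hlineall : line.all pvNB = true := List.all_takeWhile
      have hlinedom : line.all pvDomChar = true := by
        rw [List.all_eq_true] at hdom ⊢
        intro c hc
        exact hdom c (by rw [← hsplit]; exact List.mem_append_left _ hc)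
      have hlineB : line.all (fun c => pvIsB c = false) = true := by
        rw [List.all_eq_true] at hlineall hlinedom ⊢
        intro c hc
        simp [pv_nb_isB c (hlinedom c hc) (hlineall c hc)]
      cases hrc : r with
      | nil =>
        have htline : t = line := by rw [← hsplit, hrc, List.append_nil]
        have hlinene : line ≠ [] := by rw [← htline]; exact hempty
        have hsl : PySem.Chars.splitlines t = [line] := by
          rw [htline]; exact pv_splitlines_last line hlineB hlinene
        rw [hsl]
        have hlenline : line.length = s.length - i := by rw [← htline]; exact hlens
        have hspan : pvSpansGo s s.length [line] i = [(i, i + line.length)] := by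
          simp [pvSpansGo]
        rw [hspan]
        refine ⟨⟨rfl, ?_⟩, fun _ => rfl⟩
        intro k hk
        have hk0 : k = 0 := by simpa using hk
        subst hk0
        refine ⟨rfl, ?_, by simp; omega, fun h => absurd h (by simp)⟩
        simp only [List.getD_cons_zero]
        rw [← ht, htline]
        exact List.take_length
      | cons c rest0 =>
        have hcnb : pvNB c = false := by
          have hrne : t.dropWhile pvNB ≠ [] := by rw [← hr, hrc]; simp
          have hdw : List.dropWhile pvNB t = c :: rest0 := by rw [← hr]; exact hrc
          have := List.head_dropWhile_not pvNB hrne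
          simp only [hdw, List.head_cons] at this
          exact this
        have hcbr : c = '\n' ∨ c = '\r' := by
          simp only [pvNB, Bool.not_eq_false', Bool.or_eq_true, beq_iff_eq] at hcnb
          exact hcnb
        -- common abbreviations
        have hlenline : line.length + r.length = s.length - i := by
          have := congrArg List.length hsplit
          simp at this
          omega
        -- index facts: t[line.length + m]? = r[m]?
        have hidx : ∀ m : Nat, s[i + (line.length + m)]? = r[m]? := by
          intro m
          have h1 : (s.drop i)[line.length + m]? = s[i + (line.length + m)]? :=
            List.getElem?_drop
          rw [← h1, ← ht, ← hsplit]
          have : (line ++ r)[line.length + m]? = r[m]? := by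
            rw [List.getElem?_append_right (by omega)]
            simp
          rw [this]
        -- case split on the separator
        have hslice : (s.drop i).take line.length = line := by
          rw [← ht, ← hsplit, List.take_left]
        rcases hcbr with hcn | hcr2
        · -- sep = ['\n']
          subst hcn
          have hteq : t = line ++ ['\n'] ++ rest0 := by
            rw [← hsplit, hrc]; simp
          have hsl : PySem.Chars.splitlines (s.drop i) = line :: PySem.Chars.splitlines rest0 := by
            rw [← ht, hteq]
            exact pv_splitlines_cons line ['\n'] rest0 hlineB (Or.inr (Or.inl rfl))
          have hdropi' : s.drop (i + (line.length + 1)) = rest0 := by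
            rw [← List.drop_drop, ← ht, hteq, List.append_assoc,
                show line.length + 1 = (line ++ ['\n']).length by simp, ← List.append_assoc,
                List.drop_left]
          have hj : s[i + line.length]? = some '\n' := by
            have h0 := hidx 0
            simp only [Nat.add_zero] at h0
            rw [h0, hrc]
            rfl
          have hjlt : i + line.length < s.length := (List.getElem?_eq_some_iff.mp hj).1
          have hrest0len : i + (line.length + 1) + rest0.length = s.length := by
            have := congrArg List.length hrc
            simp at this
            omega
          have hif : (if i + line.length < s.length ∧ s.getD (i + line.length) ' ' = '\r' ∧
              i + line.length + 1 < s.length ∧ s.getD (i + line.length + 1) ' ' = '\n'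
              then i + line.length + 2 else i + line.length + 1) = i + (line.length + 1) := by
            rw [if_neg, Nat.add_assoc]
            rintro ⟨-, h2, -, -⟩
            rw [List.getD_eq_getElem?_getD, hj] at h2
            cases h2
          have hdom' : (s.drop (i + (line.length + 1))).all pvDomChar = true := by
            rw [hdropi', List.all_eq_true]
            intro x hx
            exact (List.all_eq_true.mp hdom) x
              (by rw [show t = _ from hteq]; exact List.mem_append_right _ (by simpa using hx))
          exact pv_span_step_common m ih s line rest0 i (i + (line.length + 1)) hsl hdropi' hif
            hslice (by omega) (by omega) hm hdom'
        · -- c = '\r'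
          subst hcr2
          have hj : s[i + line.length]? = some '\r' := by
            have h0 := hidx 0
            simp only [Nat.add_zero] at h0
            rw [h0, hrc]
            rfl
          have hjlt : i + line.length < s.length := (List.getElem?_eq_some_iff.mp hj).1
          have hgj : s.getD (i + line.length) ' ' = '\r' := by
            rw [List.getD_eq_getElem?_getD, hj]; rfl
          cases hrc2 : rest0 with
          | cons c2 r2 =>
            by_cases hc2 : c2 = '\n'
            · -- sep = ['\r', '\n']
              subst hc2
              have hteq : t = line ++ ['\r', '\n'] ++ r2 := by
                rw [← hsplit, hrc, hrc2]; simp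
              have hsl : PySem.Chars.splitlines (s.drop i) = line :: PySem.Chars.splitlines r2 := by
                rw [← ht, hteq]
                exact pv_splitlines_cons line ['\r', '\n'] r2 hlineB (Or.inl rfl)
              have hdropi' : s.drop (i + (line.length + 2)) = r2 := by
                rw [← List.drop_drop, ← ht, hteq, List.append_assoc,
                    show line.length + 2 = (line ++ ['\r', '\n']).length by simp,
                    ← List.append_assoc, List.drop_left]
              have hj2 : s[i + line.length + 1]? = some '\n' := by
                have h1 := hidx 1
                rw [show line.length + 1 = line.length + 1 by rfl] at h1
                rw [← Nat.add_assoc] at h1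
                rw [h1, hrc, hrc2]
                rfl
              have hj2lt : i + line.length + 1 < s.length := (List.getElem?_eq_some_iff.mp hj2).1
              have hr2len : i + (line.length + 2) + r2.length = s.length := by
                have := congrArg List.length hrc
                rw [hrc2] at this
                simp at this
                omega
              have hif : (if i + line.length < s.length ∧ s.getD (i + line.length) ' ' = '\r' ∧
                  i + line.length + 1 < s.length ∧ s.getD (i + line.length + 1) ' ' = '\n'
                  then i + line.length + 2 else i + line.length + 1) = i + (line.length + 2) := by
                rw [if_pos ⟨hjlt, hgj, hj2lt, by rw [List.getD_eq_getElem?_getD, hj2]; rfl⟩]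
                omega
              have hdom' : (s.drop (i + (line.length + 2))).all pvDomChar = true := by
                rw [hdropi', List.all_eq_true]
                intro x hx
                exact (List.all_eq_true.mp hdom) x
                  (by rw [show t = _ from hteq]; exact List.mem_append_right _ (by simpa using hx))
              exact pv_span_step_common m ih s line r2 i (i + (line.length + 2)) hsl hdropi' hif
                hslice (by omega) (by omega) hm hdom'
            · -- sep = ['\r'], next char is not '\n'
              have hne' : ∀ r', rest0 ≠ '\n' :: r' := by
                intro r' h
                rw [hrc2] at h
                injection h with ha _
                exact hc2 ha
              have hteq : t = line ++ ['\r'] ++ rest0 := by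
                rw [← hsplit, hrc]; simp
              have hsl : PySem.Chars.splitlines (s.drop i) = line :: PySem.Chars.splitlines rest0 := by
                rw [← ht, hteq]
                exact pv_splitlines_cons line ['\r'] rest0 hlineB (Or.inr (Or.inr ⟨rfl, hne'⟩))
              have hdropi' : s.drop (i + (line.length + 1)) = rest0 := by
                rw [← List.drop_drop, ← ht, hteq, List.append_assoc,
                    show line.length + 1 = (line ++ ['\r']).length by simp,
                    ← List.append_assoc, List.drop_left]
              have hj2 : s[i + line.length + 1]? = some c2 := by
                have h1 := hidx 1
                rw [← Nat.add_assoc] at h1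
                rw [h1, hrc, hrc2]
                rfl
              have hrest0len : i + (line.length + 1) + rest0.length = s.length := by
                have := congrArg List.length hrc
                simp at this
                omega
              have hif : (if i + line.length < s.length ∧ s.getD (i + line.length) ' ' = '\r' ∧
                  i + line.length + 1 < s.length ∧ s.getD (i + line.length + 1) ' ' = '\n'
                  then i + line.length + 2 else i + line.length + 1) = i + (line.length + 1) := by
                rw [if_neg, Nat.add_assoc]
                rintro ⟨-, -, -, h4⟩
                rw [List.getD_eq_getElem?_getD, hj2] at h4
                exact hc2 h4
              have hdom' : (s.drop (i + (line.length + 1))).all pvDomChar = true := by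
                rw [hdropi', List.all_eq_true]
                intro x hx
                exact (List.all_eq_true.mp hdom) x
                  (by rw [show t = _ from hteq]; exact List.mem_append_right _ (by simpa using hx))
              exact pv_span_step_common m ih s line rest0 i (i + (line.length + 1)) hsl hdropi' hif
                hslice (by omega) (by omega) hm hdom'
          | nil =>
            -- sep = ['\r'] at end of string
            have hne' : ∀ r', rest0 ≠ '\n' :: r' := by
              intro r' h
              rw [hrc2] at h
              cases h
            have hteq : t = line ++ ['\r'] ++ rest0 := by
              rw [← hsplit, hrc]; simp
            have hsl : PySem.Chars.splitlines (s.drop i) = line :: PySem.Chars.splitlines rest0 := by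
              rw [← ht, hteq]
              exact pv_splitlines_cons line ['\r'] rest0 hlineB (Or.inr (Or.inr ⟨rfl, hne'⟩))
            have hdropi' : s.drop (i + (line.length + 1)) = rest0 := by
              rw [← List.drop_drop, ← ht, hteq, List.append_assoc,
                  show line.length + 1 = (line ++ ['\r']).length by simp,
                  ← List.append_assoc, List.drop_left]
            have hrest0len : i + (line.length + 1) + rest0.length = s.length := by
              have := congrArg List.length hrc
              simp at this
              omega
            have hnend : i + line.length + 1 = s.length := by
              rw [hrc2] at hrest0len
              simp at hrest0len
              omega
            have hif : (if i + line.length < s.length ∧ s.getD (i + line.length) ' ' = '\r' ∧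
                i + line.length + 1 < s.length ∧ s.getD (i + line.length + 1) ' ' = '\n'
                then i + line.length + 2 else i + line.length + 1) = i + (line.length + 1) := by
              rw [if_neg, Nat.add_assoc]
              rintro ⟨-, -, h3, -⟩
              omega
            have hdom' : (s.drop (i + (line.length + 1))).all pvDomChar = true := by
              rw [hdropi', hrc2]
              rfl
            exact pv_span_step_common m ih s line rest0 i (i + (line.length + 1)) hsl hdropi' hif
              hslice (by omega) (by omega) hm hdom'


-- ---------- owner table ----------

lemma pv_chain_le (sts : List Nat)
    (hmono : ∀ u, u + 1 < sts.length → sts.getD u 0 ≤ sts.getD (u + 1) 0) :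
    ∀ b, b < sts.length → ∀ a, a ≤ b → sts.getD a 0 ≤ sts.getD b 0 := by
  intro b
  induction b with
  | zero => intro _ a ha; interval_cases a; exact Nat.le_refl _
  | succ b ihb =>
    intro hb a ha
    rcases Nat.eq_or_lt_of_le ha with h | h
    · rw [h]
    · exact Nat.le_trans (ihb (by omega) a (by omega)) (hmono b hb)

lemma pv_ownerGo_getD : ∀ (sts : List Nat) (k0 j p : Nat),
    j + 1 < sts.length →
    (∀ u, u + 1 < sts.length → sts.getD u 0 ≤ sts.getD (u + 1) 0) →
    sts.getD j 0 ≤ p → p < sts.getD (j + 1) 0 →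
    (pvOwnerGo sts k0).getD (p - sts.getD 0 0) 0 = k0 + j := by
  intro sts
  induction sts with
  | nil => intro k0 j p h; simp at h
  | cons s0 rest ihs =>
    intro k0 j p hj hmono hlo hhi
    cases rest with
    | nil => simp at hj
    | cons s1 rest2 =>
      have hs01 : s0 ≤ s1 := by
        have := hmono 0 (by simp only [List.length_cons] at hj ⊢; omega)
        simpa using this
      cases j with
      | zero =>
        simp only [List.getD_cons_zero] at hlo
        have hhi' : p < s1 := by simpa using hhi
        have hrange : p - s0 < s1 - s0 := by omega
        simp only [pvOwnerGo, List.getD_cons_zero]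
        rw [List.getD_append (List.replicate (s1 - s0) k0) (pvOwnerGo (s1 :: rest2) (k0 + 1)) 0
              (p - s0) (by simp only [List.length_replicate]; exact hrange),
            List.getD_replicate _ hrange]
        omega
      | succ j' =>
        have hj' : j' + 1 < (s1 :: rest2).length := by simp at hj ⊢; omega
        have hmono' : ∀ u, u + 1 < (s1 :: rest2).length →
            (s1 :: rest2).getD u 0 ≤ (s1 :: rest2).getD (u + 1) 0 := by
          intro u hu
          have := hmono (u + 1) (by simp at hu ⊢; omega)
          simpa using this
        have hlo' : (s1 :: rest2).getD j' 0 ≤ p := by simpa using hlo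
        have hhi' : p < (s1 :: rest2).getD (j' + 1) 0 := by simpa using hhi
        have hs1p : s1 ≤ p := by
          have := pv_chain_le (s1 :: rest2) hmono' j' (by omega) 0 (by omega)
          simp only [List.getD_cons_zero] at this
          omega
        have := ihs (k0 + 1) j' p hj' hmono' hlo' hhi'
        simp only [List.getD_cons_zero] at this ⊢
        simp only [pvOwnerGo]
        rw [List.getD_append_right _ _ _ _ (by simp only [List.length_replicate]; omega)]
        simp only [List.length_replicate]
        rw [show p - s0 - (s1 - s0) = p - s1 by omega]
        rw [this]
        omega

lemma pv_bracket (f : Nat → Nat) (p : Nat) :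
    ∀ m, f 0 ≤ p → p < f m → ∃ k, k < m ∧ f k ≤ p ∧ p < f (k + 1) := by
  intro m
  induction m with
  | zero => intro h1 h2; omega
  | succ m ihm =>
    intro h1 h2
    by_cases hp : p < f m
    · obtain ⟨k, hk, ha, hb⟩ := ihm h1 hp
      exact ⟨k, by omega, ha, hb⟩
    · exact ⟨m, by omega, by omega, h2⟩

-- ---------- the find loop ----------

lemma pv_markItemGo_unfold (s item : List Char) (owner : List Nat) (spans : List (Nat × Nat))
    (matched : List Bool) (start : Nat) :
    pvMarkItemGo s item owner spans matched start =
      if PySem.Chars.findFrom s item (start : Int) none = -1 then matched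
      else pvMarkItemGo s item owner spans
        (if (PySem.Chars.findFrom s item (start : Int) none).toNat + item.length ≤
            (spans.getD (owner.getD (PySem.Chars.findFrom s item (start : Int) none).toNat 0)
              (0, 0)).2
         then matched.set (owner.getD (PySem.Chars.findFrom s item (start : Int) none).toNat 0) true
         else matched)
        ((PySem.Chars.findFrom s item (start : Int) none).toNat + 1) := by
  rw [pvMarkItemGo]
  split <;> rfl

lemma pv_markItemGo_length (s item : List Char) (owner : List Nat) (spans : List (Nat × Nat)) :
    ∀ (m start : Nat), s.length + 1 - start ≤ m → ∀ (matched : List Bool),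
    (pvMarkItemGo s item owner spans matched start).length = matched.length := by
  intro m
  induction m with
  | zero =>
    intro start hm matched
    rw [pv_markItemGo_unfold, if_pos (pvFindFrom_of_gt s item start (by omega))]
  | succ m ihm =>
    intro start hm matched
    rw [pv_markItemGo_unfold]
    split
    · rfl
    · next hp =>
      by_cases hle : start ≤ s.length
      · have hspec := PySem.Chars.findFrom_natCast_spec s item start hle hp
        have hub := pvFindFrom_le_len s item start
        rw [ihm _ (by omega) _]
        split
        · exact List.length_set ..
        · rfl
      · exact absurd (pvFindFrom_of_gt s item start (by omega)) hp

lemma pv_markItemGo_getD (s item : List Char) (owner : List Nat) (spans : List (Nat × Nat)) :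
    ∀ (m start : Nat), s.length + 1 - start ≤ m → ∀ (matched : List Bool) (k : Nat),
    k < matched.length →
    ((pvMarkItemGo s item owner spans matched start).getD k false = true ↔
      matched.getD k false = true ∨
      ∃ p, start ≤ p ∧ p ≤ s.length ∧ item <+: s.drop p ∧ owner.getD p 0 = k ∧
        p + item.length ≤ (spans.getD k (0, 0)).2) := by
  intro m
  induction m with
  | zero =>
    intro start hm matched k hk
    rw [pv_markItemGo_unfold, if_pos (pvFindFrom_of_gt s item start (by omega))]
    constructor
    · exact Or.inl
    · rintro (h | ⟨p, hp1, hp2, -⟩)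
      · exact h
      · omega
  | succ m ihm =>
    intro start hm matched k hk
    rw [pv_markItemGo_unfold]
    split
    · next hneg =>
      by_cases hle : start ≤ s.length
      · have hnone : ¬ item <:+: s.drop start :=
          (PySem.Chars.findFrom_natCast_eq_neg_one_iff s item start hle).mp hneg
        constructor
        · exact Or.inl
        · rintro (h | ⟨p, hp1, hp2, hpre, -⟩)
          · exact h
          · exfalso
            apply hnone
            have hdd : s.drop p = (s.drop start).drop (p - start) := by
              rw [List.drop_drop]
              congr 1
              omega
            rw [hdd] at hpre
            exact hpre.isInfix.trans (List.drop_suffix _ _).isInfix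
      · constructor
        · exact Or.inl
        · rintro (h | ⟨p, hp1, hp2, -⟩)
          · exact h
          · omega
    · next hp =>
      by_cases hle : start ≤ s.length
      · obtain ⟨hge, hpre, hmin⟩ := PySem.Chars.findFrom_natCast_spec s item start hle hp
        have hub := pvFindFrom_le_len s item start
        set p0 : Int := PySem.Chars.findFrom s item (start : Int) none with hp0
        have hp0nn : 0 ≤ p0 := le_trans (by exact_mod_cast Nat.zero_le start) hge
        have hp0n : p0.toNat ≤ s.length := by omega
        have hp0ge : start ≤ p0.toNat := by omega
        set k' := owner.getD p0.toNat 0 with hk'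
        set matched' := if p0.toNat + item.length ≤ (spans.getD k' (0, 0)).2
          then matched.set k' true else matched with hm'
        have hmlen : matched'.length = matched.length := by
          rw [hm']; split
          · exact List.length_set ..
          · rfl
        rw [ihm (p0.toNat + 1) (by omega) matched' k (by omega)]
        have hgetD : matched'.getD k false = true ↔
            matched.getD k false = true ∨
            (owner.getD p0.toNat 0 = k ∧
              p0.toNat + item.length ≤ (spans.getD k (0, 0)).2) := by
          rw [hm']
          split
          · next hfit =>
            by_cases hkk : k' = k
            · subst hkk
              rw [List.getD_eq_getElem?_getD, List.getElem?_set, if_pos rfl,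
                  if_pos (by omega)]
              simp only [Option.getD_some]
              constructor
              · intro _; exact Or.inr ⟨rfl, hfit⟩
              · intro _; trivial
            · rw [List.getD_eq_getElem?_getD, List.getElem?_set, if_neg hkk,
                  ← List.getD_eq_getElem?_getD]
              constructor
              · exact Or.inl
              · rintro (h | ⟨hkeq, -⟩)
                · exact h
                · exact absurd hkeq hkk
          · next hfit =>
            constructor
            · exact Or.inl
            · rintro (h | ⟨hkeq, hfit2⟩)
              · exact h
              · rw [← hkeq] at hfit2
                exact absurd hfit2 hfit
        rw [hgetD]
        constructor
        · rintro ((h | ⟨hkeq, hfit⟩) | ⟨p, hp1, hp2, hpre2, hown, hfit⟩)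
          · exact Or.inl h
          · exact Or.inr ⟨p0.toNat, hp0ge, hp0n, hpre, hkeq, hfit⟩
          · exact Or.inr ⟨p, by omega, hp2, hpre2, hown, hfit⟩
        · rintro (h | ⟨p, hp1, hp2, hpre2, hown, hfit⟩)
          · exact Or.inl (Or.inl h)
          · rcases Nat.lt_or_ge p (p0.toNat) with hplt | hpge
            · exact absurd hpre2 (hmin p hp1 hplt)
            · rcases Nat.eq_or_lt_of_le hpge with hpeq | hpgt
              · exact Or.inl (Or.inr ⟨by rw [hpeq]; exact hown, by rw [hpeq]; exact hfit⟩)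
              · exact Or.inr ⟨p, by omega, hp2, hpre2, hown, hfit⟩
      · exact absurd (pvFindFrom_of_gt s item start (by omega)) hp


-- ---------- marking = per-line membership ----------

lemma pv_fold_mark (s : List Char) (owner : List Nat) (spans : List (Nat × Nat)) :
    ∀ (items : List String) (matched : List Bool) (k : Nat), k < matched.length →
    ((pvMarkItemsGo s owner spans items matched).getD k false = true ↔
      matched.getD k false = true ∨
      ∃ it ∈ items, ∃ p, p ≤ s.length ∧ it.toList <+: s.drop p ∧ owner.getD p 0 = k ∧
        p + it.toList.length ≤ (spans.getD k (0, 0)).2) := by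
  intro items
  induction items with
  | nil => intro matched k hk; simp [pvMarkItemsGo]
  | cons it0 rest ihr =>
    intro matched k hk
    simp only [pvMarkItemsGo]
    by_cases hall : matched.all (fun b => b) = true
    · rw [if_pos hall]
      have hkt : matched.getD k false = true := by
        rw [List.getD_eq_getElem _ _ hk]
        exact List.all_eq_true.mp hall _ (List.getElem_mem hk)
      rw [hkt]
      simp
    · rw [if_neg hall]
      have hlen0 : k < (pvMarkItemGo s it0.toList owner spans matched 0).length := by
        rw [pv_markItemGo_length s it0.toList owner spans (s.length + 1) 0 (by omega)]
        exact hk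
    
      rw [ihr _ k hlen0]
      rw [pv_markItemGo_getD s it0.toList owner spans (s.length + 1) 0 (by omega) matched k hk]
      constructor
      · rintro ((h | ⟨p, -, hp2, hp3, hp4, hp5⟩) | ⟨it, hit, hex⟩)
        · exact Or.inl h
        · exact Or.inr ⟨it0, (by simp : it0 ∈ it0 :: rest), p, hp2, hp3, hp4, hp5⟩
        · exact Or.inr ⟨it, List.mem_cons_of_mem _ hit, hex⟩
      · rintro (h | ⟨it, hit, hex⟩)
        · exact Or.inl (Or.inl h)
        · rcases List.mem_cons.mp hit with heq | hmem
          · subst heq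
            obtain ⟨p, hp2, hp3, hp4, hp5⟩ := hex
            exact Or.inl (Or.inr ⟨p, Nat.zero_le _, hp2, hp3, hp4, hp5⟩)
          · exact Or.inr ⟨it, hmem, hex⟩

lemma pv_matched_char (s : List Char) (hdom : s.all pvDomChar = true)
    (items : List String) (k : Nat) (hk : k < (PySem.Chars.splitlines s).length) :
    ((pvMarkItemsGo s
        (pvOwnerGo ((pvSpansGo s s.length (PySem.Chars.splitlines s) 0).map (·.1) ++ [s.length + 1]) 0)
        (pvSpansGo s s.length (PySem.Chars.splitlines s) 0) items
        (List.replicate (PySem.Chars.splitlines s).length false)).getD k false)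
      = items.any (fun it => PySem.Chars.isIn it.toList ((PySem.Chars.splitlines s).getD k [])) := by
  have hspans := pv_spansGo_ok s.length s 0 (by omega) (by omega)
    (by rw [List.drop_zero]; exact hdom)
  rw [List.drop_zero] at hspans
  obtain ⟨⟨hlen, hok⟩, hhead⟩ := hspans
  set lines := PySem.Chars.splitlines s with hlines
  set spans := pvSpansGo s s.length lines 0 with hspansdef
  set starts : List Nat := spans.map (·.1) ++ [s.length + 1] with hstarts
  set owner := pvOwnerGo starts 0 with howner
  have hkk : k < spans.length := by omega
  have hsplen : 0 < spans.length := by omega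
  -- starts access
  have hsA : ∀ j, j < spans.length → starts.getD j 0 = (spans.getD j (0, 0)).1 := by
    intro j hj
    rw [hstarts, List.getD_append _ _ _ _ (by simpa using hj),
        List.getD_eq_getElem?_getD, List.getElem?_map]
    rw [List.getElem?_eq_getElem (by simpa using hj)]
    simp [List.getD_eq_getElem?_getD, List.getElem?_eq_getElem hj]
  have hsB : starts.getD spans.length 0 = s.length + 1 := by
    rw [hstarts, List.getD_append_right _ _ _ _ (by simp)]
    simp
  have hstartslen : starts.length = spans.length + 1 := by simp [hstarts]
  have hmono : ∀ u, u + 1 < starts.length → starts.getD u 0 ≤ starts.getD (u + 1) 0 := by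
    intro u hu
    rw [hstartslen] at hu
    have hu' : u < spans.length := by omega
    obtain ⟨hb, -, hn, hgap⟩ := hok u hu'
    rcases Nat.lt_or_ge (u + 1) spans.length with h1 | h1
    · rw [hsA u hu', hsA (u + 1) h1]
      have := hgap h1
      omega
    · have : u + 1 = spans.length := by omega
      rw [hsA u hu', this, hsB]
      omega
  have hgapS : ∀ j, j < spans.length → (spans.getD j (0, 0)).2 < starts.getD (j + 1) 0 := by
    intro j hj
    obtain ⟨-, -, hn, hgap⟩ := hok j hj
    rcases Nat.lt_or_ge (j + 1) spans.length with h1 | h1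
    · rw [hsA (j + 1) h1]; exact hgap h1
    · have : j + 1 = spans.length := by omega
      rw [this, hsB]; omega
  have hstart0 : starts.getD 0 0 = 0 := by
    rw [hsA 0 hsplen, hhead hsplen]
  have hOWN1 : ∀ j, j < spans.length → ∀ p, (spans.getD j (0, 0)).1 ≤ p →
      p < starts.getD (j + 1) 0 → owner.getD p 0 = j := by
    intro j hj p hlo hhi
    have := pv_ownerGo_getD starts 0 j p (by omega) hmono (by rw [hsA j hj]; exact hlo) hhi
    rw [hstart0, Nat.sub_zero, Nat.zero_add] at this
    exact this
  have hOWN2 : ∀ p, p ≤ s.length → ∃ j, j < spans.length ∧ starts.getD j 0 ≤ p ∧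
      p < starts.getD (j + 1) 0 := by
    intro p hp
    exact pv_bracket (fun j => starts.getD j 0) p spans.length
      (by change starts.getD 0 0 ≤ p; rw [hstart0]; omega)
      (by change p < starts.getD spans.length 0; rw [hsB]; omega)
  -- per-item occurrence ↔ membership in line k
  have hbridge : ∀ item : List Char,
      ((∃ p, p ≤ s.length ∧ item <+: s.drop p ∧ owner.getD p 0 = k ∧
        p + item.length ≤ (spans.getD k (0, 0)).2) ↔ item <:+: lines.getD k []) := by
    intro item
    obtain ⟨hb, hslice, hn, -⟩ := hok k hkk
    constructor
    · rintro ⟨p, hpn, hpre, hown, hfit⟩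
      obtain ⟨j, hj, hjlo, hjhi⟩ := hOWN2 p hpn
      have hj2 : owner.getD p 0 = j := hOWN1 j hj p (by rw [← hsA j hj]; exact hjlo) hjhi
      have hjk : j = k := by rw [hown] at hj2; omega
      rw [hjk] at hjlo
      rw [hsA k hkk] at hjlo
      have hdropline : (lines.getD k []).drop (p - (spans.getD k (0, 0)).1) =
          (s.drop p).take ((lines.getD k []).length - (p - (spans.getD k (0, 0)).1)) := by
        conv_lhs => rw [hslice.symm]
        rw [List.drop_take, List.drop_drop,
            show (spans.getD k (0, 0)).1 + (p - (spans.getD k (0, 0)).1) = p by omega]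
      have hpref2 : item <+: (lines.getD k []).drop (p - (spans.getD k (0, 0)).1) := by
        rw [hdropline]
        exact List.prefix_take_iff.mpr ⟨hpre, by omega⟩
      exact hpref2.isInfix.trans (List.drop_suffix _ _).isInfix
    · intro hinf
      obtain ⟨j0, hj0⟩ := (PySem.Chars.exists_prefix_drop_iff_isIn item (lines.getD k [])).mpr
        ((PySem.Chars.isIn_iff_infix item (lines.getD k [])).mpr hinf)
      -- cap the drop position at the line length
      have hj0' : ∃ j1, j1 ≤ (lines.getD k []).length ∧ item <+: (lines.getD k []).drop j1 := by
        rcases Nat.lt_or_ge (lines.getD k []).length j0 with h | h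
        · refine ⟨(lines.getD k []).length, Nat.le_refl _, ?_⟩
          rw [List.drop_length]
          rw [List.drop_eq_nil_of_le (by omega)] at hj0
          exact hj0
        · exact ⟨j0, h, hj0⟩
      obtain ⟨j1, hj1le, hj1⟩ := hj0'
      set a := (spans.getD k (0, 0)).1 with ha
      set p := a + j1 with hp
      have hpb : p ≤ (spans.getD k (0, 0)).2 := by omega
      have hdropline : (lines.getD k []).drop j1 =
          (s.drop p).take ((lines.getD k []).length - j1) := by
        conv_lhs => rw [hslice.symm]
        rw [List.drop_take, List.drop_drop, show a + j1 = p by omega]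
      rw [hdropline] at hj1
      obtain ⟨hpre, hlenle⟩ := List.prefix_take_iff.mp hj1
      refine ⟨p, by omega, hpre, ?_, by omega⟩
      exact hOWN1 k hkk p (by omega) (by have := hgapS k hkk; omega)
  -- assemble: fold over items, initial flags all false
  have hfold := pv_fold_mark s owner spans items
    (List.replicate lines.length false) k (by simpa using hk)
  have hinit : (List.replicate lines.length false).getD k false = false :=
    List.getD_replicate _ hk
  rw [hinit] at hfold
  simp only [Bool.false_eq_true, false_or] at hfold
  rw [Bool.eq_iff_iff, hfold, List.any_eq_true]
  constructor
  · rintro ⟨it, hit, hex⟩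
    exact ⟨it, hit, (PySem.Chars.isIn_iff_infix _ _).mpr ((hbridge it.toList).mp hex)⟩
  · rintro ⟨it, hit, hmem⟩
    exact ⟨it, hit, (hbridge it.toList).mpr ((PySem.Chars.isIn_iff_infix _ _).mp hmem)⟩

-- ---------- the rewrite pass is a map ----------

lemma pv_outGo_map (items : List String) :
    ∀ (ls : List (List Char)) (k0 : Nat) (matched : List Bool),
    (∀ d, d < ls.length → matched.getD (k0 + d) false =
      items.any (fun it => PySem.Chars.isIn it.toList (ls.getD d []))) →
    pvOutGo matched ls k0 = ls.map (fun line =>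
      if items.any (fun it => PySem.Chars.isIn it.toList line) then pvRewriteC line else line) := by
  intro ls
  induction ls with
  | nil => intro k0 matched _; rfl
  | cons line rest ihr =>
    intro k0 matched hm
    simp only [pvOutGo, List.map_cons]
    congr 1
    · have h0 := hm 0 (by simp)
      simp only [Nat.add_zero, List.getD_cons_zero] at h0
      rw [h0]
    · refine ihr (k0 + 1) matched ?_
      intro d hd
      have := hm (d + 1) (by simpa using Nat.add_lt_add_right hd 1)
      rw [show k0 + (d + 1) = k0 + 1 + d by omega] at this
      simpa using this


-- ---------- A's nested loop per line ----------

-- the value A appends for one line, as a single function of the line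
def pvMarkS (fixed_items : List String) (line : String) : String :=
  if fixed_items.any (fun item => PySem.Str.isIn item line) then
    if PySem.Str.isIn "- [ ]" line then PySem.Str.replace line "- [ ]" "- [x]"
    else if !PySem.Str.isIn "[x]" line && !PySem.Str.isIn "[Fixed]" line then
      line ++ " [Fixed]"
    else line
  else line

-- on a line whose checkbox is absent and which already carries [x] or [Fixed],
-- every item list leaves the line unchanged
lemma pv_markS_stuck (line : String)
    (hbox : PySem.Chars.isIn ['-', ' ', '[', ' ', ']'] line.toList = false)
    (h2 : PySem.Chars.isIn ['[', 'x', ']'] line.toList = true ∨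
          PySem.Chars.isIn ['[', 'F', 'i', 'x', 'e', 'd', ']'] line.toList = true) :
    ∀ items, pvMarkS items line = line := by
  intro items
  unfold pvMarkS
  split
  · rcases h2 with h2 | h2 <;> simp [hbox, h2]
  · rfl

-- the fallen-through inner loop and the per-line mark agree line by line
lemma pv_inner_eq (line : String) : ∀ items : List String,
    (match pvInnerA line items with | some s => s | none => line) = pvMarkS items line := by
  intro items
  induction items with
  | nil => simp [pvInnerA, pvMarkS]
  | cons item rest ih =>
    cases hin : PySem.Chars.isIn item.toList line.toList with
    | false =>
      have hA : pvInnerA line (item :: rest) = pvInnerA line rest := by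
        simp [pvInnerA, hin]
      have hB : pvMarkS (item :: rest) line = pvMarkS rest line := by
        simp [pvMarkS, hin]
      rw [hA, hB, ih]
    | true =>
      cases hbox : PySem.Chars.isIn ['-', ' ', '[', ' ', ']'] line.toList with
      | true => simp [pvInnerA, pvMarkS, hin, hbox]
      | false =>
        cases hx : PySem.Chars.isIn ['[', 'x', ']'] line.toList with
        | false =>
          cases hf : PySem.Chars.isIn ['[', 'F', 'i', 'x', 'e', 'd', ']'] line.toList with
          | false => simp [pvInnerA, pvMarkS, hin, hbox, hx, hf]
          | true =>
            have hA : pvInnerA line (item :: rest) = pvInnerA line rest := by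
              simp [pvInnerA, hin, hbox, hx, hf]
            rw [hA, ih, pv_markS_stuck line hbox (Or.inr hf), pv_markS_stuck line hbox (Or.inr hf)]
        | true =>
          have hA : pvInnerA line (item :: rest) = pvInnerA line rest := by
            simp [pvInnerA, hin, hbox, hx]
          rw [hA, ih, pv_markS_stuck line hbox (Or.inl hx), pv_markS_stuck line hbox (Or.inl hx)]

-- A's append-in-the-loop foldl is the map of the per-line function
lemma pv_foldl_eq_map (f : String → Option String) (g : String → String)
    (h : ∀ line, (match f line with | some s => s | none => line) = g line) :
    ∀ (xs : List String) (acc : List String),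
      xs.foldl (fun acc line =>
        match f line with
        | some s => acc ++ [s]
        | none => acc ++ [line]) acc = acc ++ xs.map g := by
  intro xs
  induction xs with
  | nil => intro acc; simp
  | cons x xs ih =>
    intro acc
    simp only [List.foldl_cons, List.map_cons]
    cases hfx : f x with
    | none =>
      have hx : x = g x := by have := h x; rw [hfx] at this; exact this
      rw [ih, ← hx]
      simp
    | some s =>
      have hx : s = g x := by have := h x; rw [hfx] at this; exact this
      rw [ih, ← hx]
      simp

-- the per-line mark, moved to the character level
lemma pv_markS_toList (items : List String) (line : String) :
    (pvMarkS items line).toList =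
      (if items.any (fun it => PySem.Chars.isIn it.toList line.toList)
       then pvRewriteC line.toList else line.toList) := by
  unfold pvMarkS pvRewriteC
  by_cases hany : items.any (fun it => PySem.Chars.isIn it.toList line.toList)
  · rw [if_pos (by simpa using hany), if_pos hany]
    by_cases hbox : PySem.Chars.isIn ['-', ' ', '[', ' ', ']'] line.toList
    · rw [if_pos (by simpa using hbox), if_pos hbox]
      simp
    · rw [if_neg (by simpa using hbox), if_neg hbox]
      by_cases hrest : !PySem.Chars.isIn ['[', 'x', ']'] line.toList &&
          !PySem.Chars.isIn ['[', 'F', 'i', 'x', 'e', 'd', ']'] line.toList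
      · rw [if_pos (by simpa using hrest), if_pos hrest]
        simp
      · rw [if_neg (by simpa using hrest), if_neg hrest]
  · rw [if_neg (by simpa using hany), if_neg hany]

-- ===== VERDICT (by name: the statement is the Claim_ definition above) =====
theorem update_fixed_items_spec : Claim_equal_update_fixed_items := by
  intro content fixed_items hdom
  unfold Spec_update_fixed_items
  by_cases h : content = "" ∨ fixed_items = []
  · unfold update_fixed_items update_fixed_items_alt
    rw [if_pos h, if_pos h]
  · have hdomc : content.toList.all pvDomChar = true := by
      unfold Dom_update_fixed_items pvDomStr at hdom
      simp only [Bool.and_eq_true] at hdom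
      exact hdom.1
    -- A's side: the nested loop is a map of the per-line mark
    have hA : update_fixed_items content fixed_items =
        PySem.Str.join "\n" ((PySem.Str.splitlines content).map (pvMarkS fixed_items)) ++ "\n" := by
      unfold update_fixed_items
      rw [if_neg h]
      rw [pv_foldl_eq_map (fun line => pvInnerA line fixed_items) (pvMarkS fixed_items)
          (fun line => pv_inner_eq line fixed_items)]
      simp
    rw [hA]
    -- B's side: the rewrite pass is the same map
    have hB : update_fixed_items_alt content fixed_items =
        String.ofList (PySem.Chars.join ['\n']
          (pvOutGo
            (pvMarkItemsGo content.toList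
              (pvOwnerGo ((pvSpansGo content.toList content.toList.length
                (PySem.Chars.splitlines content.toList) 0).map (·.1) ++
                [content.toList.length + 1]) 0)
              (pvSpansGo content.toList content.toList.length
                (PySem.Chars.splitlines content.toList) 0) fixed_items
              (List.replicate (PySem.Chars.splitlines content.toList).length false))
            (PySem.Chars.splitlines content.toList) 0) ++ ['\n']) := by
      unfold update_fixed_items_alt
      rw [if_neg h]
    rw [hB]
    have hchar := pv_matched_char content.toList hdomc fixed_items
    have hout := pv_outGo_map fixed_items (PySem.Chars.splitlines content.toList) 0
      (pvMarkItemsGo content.toList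
        (pvOwnerGo ((pvSpansGo content.toList content.toList.length
          (PySem.Chars.splitlines content.toList) 0).map (·.1) ++ [content.toList.length + 1]) 0)
        (pvSpansGo content.toList content.toList.length
          (PySem.Chars.splitlines content.toList) 0) fixed_items
        (List.replicate (PySem.Chars.splitlines content.toList).length false))
      (by
        intro d hd
        rw [Nat.zero_add]
        exact hchar d hd)
    rw [hout]
    rw [← String.toList_inj]
    simp only [String.toList_append, PySem.Str.toList_join, String.toList_ofList]
    rw [show ("\n" : String).toList = ['\n'] from rfl]
    rw [← PySem.Str.splitlines_map_toList content, List.map_map, List.map_map]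
    have hmap : List.map (String.toList ∘ pvMarkS fixed_items) (PySem.Str.splitlines content) =
        List.map ((fun line => if fixed_items.any
            (fun it => PySem.Chars.isIn it.toList line) then pvRewriteC line else line) ∘
          String.toList) (PySem.Str.splitlines content) :=
      List.map_congr_left (fun line _ => pv_markS_toList fixed_items line)
    rw [hmap]
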